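-- pv_equiv track=rewrite | github.com/DuoPan/r-e-a-challenge-py | TableTop.py | __getSafeLocations
-- ===== SOURCE A (Python) =====
-- def __getSafeLocations(rows, columns):
-- 	_safeToNorth = []
-- 	_safeToSouth = []
-- 	_safeToWest = []
-- 	_safeToEast = []
-- 	for i in range(rows):
-- 		for j in range(columns):
-- 			# top row cannot move to north
-- 			if (i != rows - 1):
-- 				_safeToNorth.append((j, i))
-- 			# bottom row cannot move to south
-- 			if (i != 0):
-- 				_safeToSouth.append((j, i))
-- 			# left column cannot move to west
-- 			if (j != 0):
-- 				_safeToWest.append((j, i))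
-- 			# right column cannot move to east
-- 			if (j != columns - 1):
-- 				_safeToEast.append((j, i))
-- 	return _safeToNorth, _safeToSouth, _safeToWest, _safeToEast
-- ===== SOURCE B (Python) =====
-- def __getSafeLocations(rows, columns):
-- 	grid = [(j, i) for i in range(rows) for j in range(columns)]
-- 	north = grid[:columns * (rows - 1)]
-- 	south = grid[columns:]
-- 	west = [cell for cell in grid if cell[0] != 0]
-- 	east = [cell for cell in grid if cell[0] != columns - 1]
-- 	return north, south, west, east
-- ===== Notes on version B (the rewrite author's own statement) =====
-- stated objective: simpler
-- what changed: B builds the row-major grid once and derives north/south by contiguous slicing (drop last row / drop first row) and west/east by filtering the grid, instead of A's four per-cell condition checks inside nested loops.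
import Mathlib
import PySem

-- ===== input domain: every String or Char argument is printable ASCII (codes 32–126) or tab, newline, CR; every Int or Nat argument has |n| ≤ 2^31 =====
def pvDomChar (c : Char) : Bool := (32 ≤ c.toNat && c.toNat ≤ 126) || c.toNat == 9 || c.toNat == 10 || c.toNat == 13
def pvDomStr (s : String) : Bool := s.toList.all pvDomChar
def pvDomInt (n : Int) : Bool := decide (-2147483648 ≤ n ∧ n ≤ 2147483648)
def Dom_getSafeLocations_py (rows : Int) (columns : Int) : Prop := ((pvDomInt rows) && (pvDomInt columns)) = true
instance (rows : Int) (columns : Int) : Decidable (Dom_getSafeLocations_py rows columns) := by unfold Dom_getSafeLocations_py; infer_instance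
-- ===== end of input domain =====

-- B builds the grid once and derives north/south by contiguous slicing and west/east by
-- filtering the grid, instead of A's four per-cell condition checks in nested loops (simpler).

-- ===== PORT A =====
-- literal port of A: nested loops appending to four accumulators under per-cell conditions
def getSafeLocations_py (rows : Int) (columns : Int) : (List (Int × Int)) × (List (Int × Int)) × (List (Int × Int)) × (List (Int × Int)) :=
  let r := (PySem.List.pyRange 0 rows 1).foldl (fun st i =>
    (PySem.List.pyRange 0 columns 1).foldl (fun st j =>
      let n := if i ≠ rows - 1 then st.1 ++ [(j, i)] else st.1
      let s := if i ≠ 0 then st.2.1 ++ [(j, i)] else st.2.1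
      let w := if j ≠ 0 then st.2.2.1 ++ [(j, i)] else st.2.2.1
      let e := if j ≠ columns - 1 then st.2.2.2 ++ [(j, i)] else st.2.2.2
      (n, s, w, e)) st) (([] : List (Int × Int)), ([] : List (Int × Int)), ([] : List (Int × Int)), ([] : List (Int × Int)))
  r

-- ===== PORT B =====
-- literal port of B: build the row-major grid once, slice off last/first row, filter columns
def getSafeLocations_py_alt (rows : Int) (columns : Int) : (List (Int × Int)) × (List (Int × Int)) × (List (Int × Int)) × (List (Int × Int)) :=
  let grid := (PySem.List.pyRange 0 rows 1).flatMap (fun i =>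
    (PySem.List.pyRange 0 columns 1).map (fun j => (j, i)))
  let north := PySem.List.slice grid none (some (columns * (rows - 1)))
  let south := PySem.List.slice grid (some columns) none
  let west := grid.filter (fun cell => !(cell.1 == 0))
  let east := grid.filter (fun cell => !(cell.1 == columns - 1))
  (north, south, west, east)

-- ===== PRECONDITION & SPEC =====
def Spec_getSafeLocations_py (rows : Int) (columns : Int) (out : (List (Int × Int)) × (List (Int × Int)) × (List (Int × Int)) × (List (Int × Int))) : Prop := out = getSafeLocations_py_alt rows columns
instance (rows : Int) (columns : Int) (out : (List (Int × Int)) × (List (Int × Int)) × (List (Int × Int)) × (List (Int × Int))) : Decidable (Spec_getSafeLocations_py rows columns out) := by unfold Spec_getSafeLocations_py; infer_instance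

-- ===== CLAIM (what is proved, stated in full; the proofs are below) =====
def Claim_equal_getSafeLocations_py : Prop := ∀ (rows : Int) (columns : Int), Dom_getSafeLocations_py rows columns → Spec_getSafeLocations_py rows columns (getSafeLocations_py rows columns)

-- ===== LEMMAS AND PROOFS =====

-- characterisation of A's inner (j-)loop, for any starting state
theorem pv_inner (rows columns i : Int) (l : List Int)
    (st : (List (Int × Int)) × (List (Int × Int)) × (List (Int × Int)) × (List (Int × Int))) :
    l.foldl (fun st j =>
      let n := if i ≠ rows - 1 then st.1 ++ [(j, i)] else st.1
      let s := if i ≠ 0 then st.2.1 ++ [(j, i)] else st.2.1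
      let w := if j ≠ 0 then st.2.2.1 ++ [(j, i)] else st.2.2.1
      let e := if j ≠ columns - 1 then st.2.2.2 ++ [(j, i)] else st.2.2.2
      (n, s, w, e)) st =
    (st.1 ++ (if i ≠ rows - 1 then l.map (fun j => (j, i)) else []),
     st.2.1 ++ (if i ≠ 0 then l.map (fun j => (j, i)) else []),
     st.2.2.1 ++ (l.filter (fun j => !(j == 0))).map (fun j => (j, i)),
     st.2.2.2 ++ (l.filter (fun j => !(j == columns - 1))).map (fun j => (j, i))) := by
  induction l generalizing st with
  | nil => simp
  | cons j t ih =>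
    simp only [List.foldl_cons]
    rw [ih]
    dsimp only
    simp only [Prod.mk.injEq]
    refine ⟨?_, ?_, ?_, ?_⟩
    · by_cases h : i = rows - 1 <;> simp [h]
    · by_cases h : i = 0 <;> simp [h]
    · by_cases h : j = 0 <;> simp [h]
    · by_cases h : j = columns - 1 <;> simp [h]

-- characterisation of A's outer (i-)loop
theorem pv_outer (rows columns : Int) (l : List Int)
    (st : (List (Int × Int)) × (List (Int × Int)) × (List (Int × Int)) × (List (Int × Int))) :
    l.foldl (fun st i =>
      (PySem.List.pyRange 0 columns 1).foldl (fun st j =>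
        let n := if i ≠ rows - 1 then st.1 ++ [(j, i)] else st.1
        let s := if i ≠ 0 then st.2.1 ++ [(j, i)] else st.2.1
        let w := if j ≠ 0 then st.2.2.1 ++ [(j, i)] else st.2.2.1
        let e := if j ≠ columns - 1 then st.2.2.2 ++ [(j, i)] else st.2.2.2
        (n, s, w, e)) st) st =
    (st.1 ++ l.flatMap (fun i => if i ≠ rows - 1 then (PySem.List.pyRange 0 columns 1).map (fun j => (j, i)) else []),
     st.2.1 ++ l.flatMap (fun i => if i ≠ 0 then (PySem.List.pyRange 0 columns 1).map (fun j => (j, i)) else []),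
     st.2.2.1 ++ l.flatMap (fun i => ((PySem.List.pyRange 0 columns 1).filter (fun j => !(j == 0))).map (fun j => (j, i))),
     st.2.2.2 ++ l.flatMap (fun i => ((PySem.List.pyRange 0 columns 1).filter (fun j => !(j == columns - 1))).map (fun j => (j, i)))) := by
  induction l generalizing st with
  | nil => simp
  | cons i t ih =>
    simp only [List.foldl_cons]
    rw [ih, pv_inner]
    dsimp only
    simp only [List.flatMap_cons, List.append_assoc]

theorem getSafeLocations_py_spec : Claim_equal_getSafeLocations_py := by
  intro rows columns _
  unfold Spec_getSafeLocations_py getSafeLocations_py getSafeLocations_py_alt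
  dsimp only
  rw [pv_outer]
  simp only [List.nil_append]
  by_cases hr : rows ≤ 0
  · -- no rows: every list is empty on both sides
    rw [PySem.List.pyRange_one_eq_nil hr]
    simp [PySem.List.slice, PySem.List.clampIdx]
  · by_cases hc : columns ≤ 0
    · -- no columns: every row is empty, everything is empty on both sides
      rw [PySem.List.pyRange_one_eq_nil hc]
      have hnil : (PySem.List.pyRange 0 rows 1).flatMap (fun _ : Int => ([] : List (Int × Int))) = [] :=
        List.flatMap_eq_nil_iff.mpr (fun _ _ => rfl)
      simp [hnil, PySem.List.slice, PySem.List.clampIdx]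
    · rw [not_le] at hr hc
      obtain ⟨rn, hrn⟩ : ∃ n : Nat, rows - 1 = (n : Int) := ⟨(rows - 1).toNat, by omega⟩
      obtain ⟨cn, hcn⟩ : ∃ n : Nat, columns = (n : Int) := ⟨columns.toNat, by omega⟩
      have hrowlen : ∀ i : Int, ((PySem.List.pyRange 0 columns 1).map (fun j => (j, i))).length = cn := by
        intro i; simp [PySem.List.length_pyRange_one, hcn]
      -- split the i-range at the top row and at the bottom row
      have hsplit_top : PySem.List.pyRange 0 rows 1
          = PySem.List.pyRange 0 (rows - 1) 1 ++ [rows - 1] := by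
        have := PySem.List.pyRange_one_succ_right (a := 0) (b := rows - 1) (by omega)
        simpa using this
      have hsplit_bot : PySem.List.pyRange 0 rows 1 = 0 :: PySem.List.pyRange 1 rows 1 :=
        PySem.List.pyRange_one_cons (by omega)
      refine Prod.ext ?_ (Prod.ext ?_ (Prod.ext ?_ ?_))
      · -- north: A skips the top row; B takes columns*(rows-1) cells = all but the last row
        dsimp only
        rw [hsplit_top]
        have hb : (0 : Int) ≤ columns * (rows - 1) := by rw [hrn, hcn]; positivity
        rw [PySem.List.slice_to _ hb]
        simp only [List.flatMap_append, List.flatMap_cons, List.flatMap_nil]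
        rw [List.flatMap_congr (g := fun i => (PySem.List.pyRange 0 columns 1).map (fun j => (j, i)))
            (fun x hx => by
              have := (PySem.List.mem_pyRange_one.mp hx).2
              simp [show x ≠ rows - 1 by omega])]
        simp only [ne_eq, not_true_eq_false, if_false, List.append_nil]
        rw [List.take_left']
        have hlen : ((PySem.List.pyRange 0 (rows - 1) 1).flatMap
            (fun i => (PySem.List.pyRange 0 columns 1).map (fun j => (j, i)))).length = rn * cn := by
          simp [List.length_flatMap, hrowlen, hrn, List.map_const', List.sum_replicate,
            PySem.List.length_pyRange_one]
        rw [hlen, hrn, hcn]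
        rw [show ((cn : Int) * ((rn : Int))) = (((rn * cn : Nat)) : Int) by push_cast; ring,
          Int.toNat_natCast]
      · -- south: A skips the bottom row; B drops the first columns cells = the first row
        dsimp only
        rw [hsplit_bot]
        have hb2 : (0 : Int) ≤ columns := le_of_lt hc
        rw [PySem.List.slice_from _ hb2]
        simp only [List.flatMap_cons, ne_eq, not_true_eq_false, if_false, List.nil_append]
        rw [List.flatMap_congr (g := fun i => (PySem.List.pyRange 0 columns 1).map (fun j => (j, i)))
            (fun x hx => by
              have := (PySem.List.mem_pyRange_one.mp hx).1
              simp [show x ≠ 0 by omega])]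
        rw [List.drop_left']
        rw [hrowlen 0, hcn]
        simp
      · -- west: filtering the grid = per-row filtered columns
        dsimp only
        rw [List.filter_flatMap]
        refine List.flatMap_congr (fun i _ => ?_)
        rw [List.filter_map]
        rfl
      · -- east
        dsimp only
        rw [List.filter_flatMap]
        refine List.flatMap_congr (fun i _ => ?_)
        rw [List.filter_map]
        rfl
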